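-- pv_equiv track=rewrite | github.com/311zzb/cs61a_fall2020 | homework/hw05/hw05.py | split_first_number
-- ===== SOURCE A (Python) =====
-- def split_first_number(n):
--     """Split a non-negative number N into its first digit and the rest digits.
--
--     >>> split_number(12)
--     (1, 2)
--     >>> split_number(1999)
--     (1, 999)
--     """
--     assert n >= 0
--     first, rest = n, 0
--     digits = 1
--     while(first >= 10):
--         first = first // 10
--         rest = n - first * pow(10, digits)
--         digits += 1
--     return first, rest
-- ===== SOURCE B (Python) =====
-- def split_first_number(n):
--     """Split a non-negative number N into its first digit and the rest digits."""
--     assert n >= 0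
--     if n < 10:
--         return n, 0
--     first, rest = split_first_number(n // 10)
--     return first, rest * 10 + n % 10
-- ===== Notes on version B (the rewrite author's own statement) =====
-- stated objective: simpler
-- what changed: B recurses on the number with its last digit dropped until a single digit remains and rebuilds the rest from the least-significant digits on the way back, with no powers of ten and no final split, replacing A's iterative loop that reconstructs rest each iteration by subtracting the leading part times a freshly computed power of ten.
import Mathlib
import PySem

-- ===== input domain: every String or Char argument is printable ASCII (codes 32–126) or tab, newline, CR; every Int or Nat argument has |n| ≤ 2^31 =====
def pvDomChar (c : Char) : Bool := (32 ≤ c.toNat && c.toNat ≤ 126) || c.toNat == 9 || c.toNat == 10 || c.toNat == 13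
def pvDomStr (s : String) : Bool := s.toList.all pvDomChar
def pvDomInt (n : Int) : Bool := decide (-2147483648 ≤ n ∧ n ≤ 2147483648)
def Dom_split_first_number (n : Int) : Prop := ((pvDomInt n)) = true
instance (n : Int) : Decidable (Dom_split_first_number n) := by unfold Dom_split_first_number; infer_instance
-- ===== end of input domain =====

-- B recurses on n // 10 and rebuilds the rest from the least-significant digits on the way
-- back; A iterates, reconstructing rest by subtraction with pow(10, digits). (simpler)

-- ===== PORT A =====
-- A's while loop: state (first, rest, digits); pow(10, digits) is ported as 10 ^ digits.toNat,
-- exact here since digits starts at 1 and only increases.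
def split_first_number_loopA (n first rest digits : Int) : Int × Int :=
  if h : 10 ≤ first then
    let f := PySem.Int.floordiv first 10
    split_first_number_loopA n f (n - f * 10 ^ digits.toNat) (digits + 1)
  else
    (first, rest)
termination_by first.toNat
decreasing_by
  rw [PySem.Int.floordiv_eq_ediv_of_pos (by norm_num)]
  omega

def split_first_number (n : Int) : Int × Int :=
  -- assert n >= 0 : AssertionError on n < 0, excluded by Pre_split_first_number
  split_first_number_loopA n n 0 1

-- ===== PORT B =====
def split_first_number_alt (n : Int) : Int × Int :=
  -- assert n >= 0 : AssertionError on n < 0, excluded by Pre_split_first_number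
  if h : n < 10 then (n, 0)
  else
    let p := split_first_number_alt (PySem.Int.floordiv n 10)
    (p.1, p.2 * 10 + PySem.Int.mod n 10)
termination_by n.toNat
decreasing_by
  rw [PySem.Int.floordiv_eq_ediv_of_pos (by norm_num)]
  omega

-- ===== PRECONDITION & SPEC =====
-- Pre_: A's `assert n >= 0` raises AssertionError on negative n.
def Pre_split_first_number (n : Int) : Prop := 0 ≤ n
instance (n : Int) : Decidable (Pre_split_first_number n) := by unfold Pre_split_first_number; infer_instance
def pvWitness_split_first_number : Int := 1999

def Spec_split_first_number (n : Int) (out : Int × Int) : Prop := out = split_first_number_alt n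
instance (n : Int) (out : Int × Int) : Decidable (Spec_split_first_number n out) := by unfold Spec_split_first_number; infer_instance

-- ===== CLAIM (what is proved, stated in full; the proofs are below) =====
def Claim_equal_split_first_number : Prop := ∀ (n : Int), Dom_split_first_number n → Pre_split_first_number n → Spec_split_first_number n (split_first_number n)

-- ===== LEMMAS AND PROOFS =====

-- Proof-side helper: the number of digits of n counted from index d (smallest d' ≥ d with
-- 10^d' > n). Used only to relate the two ports; it belongs to neither program.
def split_first_number_dcount (n : Int) (d : Nat) : Nat :=
  if h : (10 : Int) ^ d ≤ n then split_first_number_dcount n (d + 1) else d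
termination_by n.toNat + 1 - 10 ^ d
decreasing_by
  have h1 : (10 : Nat) ^ d < 10 ^ (d + 1) :=
    Nat.pow_lt_pow_right (by norm_num) (by omega)
  have h2 : (10 : Nat) ^ d ≤ n.toNat := by
    have : ((10 : Nat) ^ d : Int) ≤ n := by push_cast; exact_mod_cast h
    omega
  omega

-- Invariant of A's loop: on entry with digit index d ≥ 1, first = n / 10^(d-1) and
-- rest = n % 10^(d-1); the loop returns the split at the final digit count.
lemma loopA_eq_dcount (n : Int) (d : Nat) (hd : 1 ≤ d) :
    split_first_number_loopA n (PySem.Int.floordiv n ((10 : Int) ^ (d - 1)))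
      (PySem.Int.mod n ((10 : Int) ^ (d - 1))) (d : Int) =
    (PySem.Int.floordiv n ((10 : Int) ^ (split_first_number_dcount n d - 1)),
     PySem.Int.mod n ((10 : Int) ^ (split_first_number_dcount n d - 1))) := by
  induction d using split_first_number_dcount.induct n with
  | case1 d hguard ih =>
    have hp : (0 : Int) < 10 ^ (d - 1) := by positivity
    have hfirst : 10 ≤ PySem.Int.floordiv n ((10 : Int) ^ (d - 1)) := by
      rw [PySem.Int.le_floordiv_iff_mul_le (hb := hp)]
      calc (10 : Int) * 10 ^ (d - 1) = 10 ^ d := by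
            rw [← pow_succ']; congr 1; omega
        _ ≤ n := hguard
    rw [split_first_number_loopA, dif_pos hfirst]
    rw [split_first_number_dcount, dif_pos hguard]
    have hdd : ((d : Int)).toNat = d := by omega
    have hdiv : PySem.Int.floordiv (PySem.Int.floordiv n ((10 : Int) ^ (d - 1))) 10
        = PySem.Int.floordiv n ((10 : Int) ^ d) := by
      rw [PySem.Int.floordiv_eq_ediv_of_pos hp,
          PySem.Int.floordiv_eq_ediv_of_pos (b := 10) (by norm_num),
          PySem.Int.floordiv_eq_ediv_of_pos (by positivity)]
      rw [Int.ediv_ediv_of_nonneg (hy := by positivity)]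
      congr 1
      rw [← pow_succ]; congr 1; omega
    have hrest : n - PySem.Int.floordiv n ((10 : Int) ^ d) * 10 ^ ((d : Int)).toNat
        = PySem.Int.mod n ((10 : Int) ^ d) := by
      rw [hdd, PySem.Int.floordiv_eq_ediv_of_pos (by positivity),
          PySem.Int.mod_eq_emod_of_pos (h := by positivity)]
      rw [Int.emod_def]; ring
    simp only [hdiv, hrest]
    have := ih (by omega)
    rw [show (d : Int) + 1 = ((d + 1 : Nat) : Int) by push_cast; ring]
    simpa using this
  | case2 d hguard =>
    have hp : (0 : Int) < 10 ^ (d - 1) := by positivity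
    have hfirst : ¬ 10 ≤ PySem.Int.floordiv n ((10 : Int) ^ (d - 1)) := by
      rw [not_le, PySem.Int.floordiv_lt_iff_lt_mul (hb := hp)]
      calc n < 10 ^ d := by omega
        _ = (10 : Int) * 10 ^ (d - 1) := by rw [← pow_succ']; congr 1; omega
    rw [split_first_number_loopA, dif_neg hfirst]
    rw [split_first_number_dcount, dif_neg hguard]

-- Shifting the starting index of the digit count tracks dividing n by 10.
lemma dcount_shift (n : Int) (d : Nat) :
    split_first_number_dcount n (d + 1)
      = split_first_number_dcount (PySem.Int.floordiv n 10) d + 1 := by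
  induction d using split_first_number_dcount.induct (PySem.Int.floordiv n 10) with
  | case1 d hguard ih =>
    have hg : (10 : Int) ^ (d + 1) ≤ n := by
      rw [PySem.Int.floordiv_eq_ediv_of_pos (by norm_num),
          Int.le_ediv_iff_mul_le (by norm_num)] at hguard
      calc (10 : Int) ^ (d + 1) = 10 ^ d * 10 := by ring
        _ ≤ n := hguard
    rw [split_first_number_dcount, dif_pos hg, ih]
    conv_rhs => rw [split_first_number_dcount]
    rw [dif_pos hguard]
  | case2 d hguard =>
    have hg : ¬ (10 : Int) ^ (d + 1) ≤ n := by
      rw [PySem.Int.floordiv_eq_ediv_of_pos (by norm_num),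
          Int.le_ediv_iff_mul_le (by norm_num)] at hguard
      intro h; apply hguard
      calc (10 : Int) ^ d * 10 = 10 ^ (d + 1) := by ring
        _ ≤ n := h
    rw [split_first_number_dcount, dif_neg hg]
    conv_rhs => rw [split_first_number_dcount]
    rw [dif_neg hguard]

-- The digit count never drops below its starting index.
lemma dcount_ge (n : Int) (d : Nat) : d ≤ split_first_number_dcount n d := by
  induction d using split_first_number_dcount.induct n with
  | case1 d hguard ih =>
    rw [split_first_number_dcount, dif_pos hguard]; omega
  | case2 d hguard =>
    rw [split_first_number_dcount, dif_neg hguard]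

-- B's recursion computes exactly the split at the digit count.
lemma alt_eq_dcount (n : Int) (hn : 0 ≤ n) :
    split_first_number_alt n
      = (PySem.Int.floordiv n ((10 : Int) ^ (split_first_number_dcount n 1 - 1)),
         PySem.Int.mod n ((10 : Int) ^ (split_first_number_dcount n 1 - 1))) := by
  induction n using split_first_number_alt.induct with
  | case1 n hlt =>
    have h1 : split_first_number_dcount n 1 = 1 := by
      rw [split_first_number_dcount, dif_neg (by simpa using hlt)]
    rw [split_first_number_alt, dif_pos hlt, h1]
    simp [PySem.Int.floordiv_eq_ediv_of_pos, PySem.Int.mod_eq_emod_of_pos]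
  | case2 n hlt ih =>
    have hn10 : (10 : Int) ≤ n := by omega
    have hq0 : 0 ≤ PySem.Int.floordiv n 10 := by
      rw [PySem.Int.floordiv_eq_ediv_of_pos (by norm_num)]
      exact Int.ediv_nonneg hn (by norm_num)
    have hIH := ih hq0
    have hd1 : split_first_number_dcount n 1 = split_first_number_dcount n 2 := by
      rw [split_first_number_dcount, dif_pos (by simpa using hn10)]
    have hshift := dcount_shift n 1
    set q := PySem.Int.floordiv n 10 with hq
    set e := split_first_number_dcount q 1 with he
    have he1 : 1 ≤ e := dcount_ge q 1
    have hdn : split_first_number_dcount n 1 = e + 1 := by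
      rw [hd1]; exact hshift
    rw [split_first_number_alt, dif_neg (by omega), hIH, hdn]
    have hp : (0 : Int) < 10 ^ (e - 1) := by positivity
    have hpow : (10 : Int) ^ (e + 1 - 1) = 10 * 10 ^ (e - 1) := by
      rw [← pow_succ']; congr 1; omega
    apply Prod.ext
    · -- first components
      show PySem.Int.floordiv q ((10:Int) ^ (e - 1)) = PySem.Int.floordiv n ((10:Int) ^ (e + 1 - 1))
      rw [hq, PySem.Int.floordiv_eq_ediv_of_pos hp,
          PySem.Int.floordiv_eq_ediv_of_pos (b := 10) (by norm_num),
          PySem.Int.floordiv_eq_ediv_of_pos (by positivity)]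
      rw [Int.ediv_ediv_of_nonneg (hy := by norm_num), hpow]
    · -- rest components
      show PySem.Int.mod q ((10:Int) ^ (e - 1)) * 10 + PySem.Int.mod n 10
            = PySem.Int.mod n ((10:Int) ^ (e + 1 - 1))
      rw [hq, PySem.Int.mod_eq_emod_of_pos (h := hp),
          PySem.Int.mod_eq_emod_of_pos (b := 10) (h := by norm_num),
          PySem.Int.mod_eq_emod_of_pos (h := by positivity),
          PySem.Int.floordiv_eq_ediv_of_pos (b := 10) (by norm_num), hpow]
      rw [Int.emod_def, Int.emod_def, Int.emod_def,
          Int.ediv_ediv_of_nonneg (hy := by norm_num)]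
      ring

-- ===== VERDICT (by name: the statement is the Claim_ definition above) =====
theorem split_first_number_spec : Claim_equal_split_first_number := by
  intro n _ hn
  unfold Spec_split_first_number split_first_number
  rw [alt_eq_dcount n hn]
  have h := loopA_eq_dcount n 1 (le_refl 1)
  simpa [PySem.Int.floordiv_eq_ediv_of_pos, PySem.Int.mod_eq_emod_of_pos,
    Int.ediv_one, Int.emod_one] using h
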